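-- pv_equiv track=rewrite | github.com/notRadman/Hemmah | hemmah.py | get_current_milestone
-- ===== SOURCE A (Python) =====
-- KEYS = {
--     'number': 'number',
--     'name': 'name',
--     'description': 'description',
--     'start': 'start',
--     'end': 'end',
--     'recovery_end': 'recovery-end',
--     'milestones': 'milestones',
--     'status': 'status',
--     'rate': 'rate',
--     'links': 'links&drafts'
-- }
--
-- def remove_comment(line):
--     """Remove comments from line (everything after #)"""
--     if '#' in line:
--         return line.split('#')[0]
--     return line
--
-- def count_indentation_level(line):
--     """Calculate indentation level (tabs or spaces)
--     - Each tab = one level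
--     - Each 4 spaces = one level (or less)
--     """
--     indent = 0
--     i = 0
--     while i < len(line):
--         if line[i] == '\t':
--             indent += 1
--             i += 1
--         elif line[i] == ' ':
--             # Count consecutive spaces
--             spaces = 0
--             while i < len(line) and line[i] == ' ':
--                 spaces += 1
--                 i += 1
--             # Each 2-4 spaces = one level
--             indent += max(1, spaces // 3)
--         else:
--             break
--     return indent
--
-- def get_current_milestone(campaign_data):
--     """Get current milestone with subtasks"""
--     milestones = campaign_data.get(KEYS['milestones'], [])
--
--     for i, milestone in enumerate(milestones):
--         # Remove comments
--         milestone_clean = remove_comment(milestone)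
--         milestone_stripped = milestone_clean.strip()
--
--         if not milestone_stripped or not milestone_stripped.startswith('- ['):
--             continue
--
--         # Calculate indentation level
--         indent_level = count_indentation_level(milestone)
--
--         # main task = level 1 (one tab or 3-4 spaces)
--         if indent_level == 1:
--             if '[ ]' in milestone_stripped:
--                 # Found pending main task
--                 text = milestone_stripped.split('[ ]', 1)[1].strip()
--
--                 # Look for pending subtask below it
--                 for j in range(i + 1, len(milestones)):
--                     sub_milestone = milestones[j]
--                     sub_clean = remove_comment(sub_milestone)
--                     sub_stripped = sub_clean.strip()
--                     sub_indent = count_indentation_level(sub_milestone)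
--
--                     # If we found another main task (level 1), stop
--                     if sub_indent == 1 and sub_stripped.startswith('- ['):
--                         break
--
--                     # If we found pending subtask (level > 1), return it
--                     if sub_indent > 1 and sub_stripped.startswith('- [') and '[ ]' in sub_stripped:
--                         sub_text = sub_stripped.split('[ ]', 1)[1].strip()
--                         return i + 1, text, sub_text, len(milestones)
--
--                 # No pending subtasks, return main task only
--                 return i + 1, text, None, len(milestones)
--
--     # Nothing pending
--     return None, None, None, len(milestones)
-- ===== SOURCE B (Python) =====
-- def remove_comment(line):
--     """Remove comments from line (everything after #)"""
--     if '#' in line: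
--         return line.split('#')[0]
--     return line
--
-- def count_indentation_level(line):
--     indent = 0
--     i = 0
--     while i < len(line):
--         if line[i] == '\t':
--             indent += 1
--             i += 1
--         elif line[i] == ' ':
--             spaces = 0
--             while i < len(line) and line[i] == ' ':
--                 spaces += 1
--                 i += 1
--             indent += max(1, spaces // 3)
--         else:
--             break
--     return indent
--
-- def get_current_milestone(campaign_data):
--     """Get current milestone with subtasks (single pass, no nested rescan)."""
--     milestones = campaign_data.get('milestones', [])
--     found = None  # (1-based index, text) of the first pending main task
--     for idx, line in enumerate(milestones):
--         stripped = remove_comment(line).strip()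
--         if not stripped.startswith('- ['):
--             continue
--         level = count_indentation_level(line)
--         if found is None:
--             if level == 1 and '[ ]' in stripped:
--                 found = (idx + 1, stripped.split('[ ]', 1)[1].strip())
--         else:
--             if level == 1:
--                 return found[0], found[1], None, len(milestones)
--             if level > 1 and '[ ]' in stripped:
--                 return found[0], found[1], stripped.split('[ ]', 1)[1].strip(), len(milestones)
--     if found is not None:
--         return found[0], found[1], None, len(milestones)
--     return None, None, None, len(milestones)
-- ===== Notes on version B (the rewrite author's own statement) =====
-- stated objective: alternative
-- what changed: Replaces A's nested loops (outer search for a pending main task plus an inner rescan from i+1 for a subtask) with a single pass that carries the found main task as state and resolves the subtask in the same sweep.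
import Mathlib
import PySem

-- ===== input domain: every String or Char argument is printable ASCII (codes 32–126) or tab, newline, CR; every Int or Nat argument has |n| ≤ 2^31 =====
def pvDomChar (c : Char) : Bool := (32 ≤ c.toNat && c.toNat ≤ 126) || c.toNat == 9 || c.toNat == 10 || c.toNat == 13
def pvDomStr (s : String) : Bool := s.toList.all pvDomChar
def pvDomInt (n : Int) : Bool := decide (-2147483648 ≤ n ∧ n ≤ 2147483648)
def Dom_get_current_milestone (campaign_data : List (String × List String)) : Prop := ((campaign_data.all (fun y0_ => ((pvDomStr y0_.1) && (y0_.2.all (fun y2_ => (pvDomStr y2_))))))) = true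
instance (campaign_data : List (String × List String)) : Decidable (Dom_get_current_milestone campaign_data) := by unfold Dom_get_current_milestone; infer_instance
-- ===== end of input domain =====

-- B replaces A's nested loops with one pass carrying the found main task as state; objective: alternative decomposition.

-- ===== PORT A =====
-- shared module helpers (identical in Source A and Source B)
def pvRemoveComment (line : String) : String :=
  if PySem.Str.isIn "#" line then ((PySem.Str.split? line "#").getD []).headD "" else line

def pvCountIndent : List Char → Nat
  | [] => 0
  | c :: rest =>
    if c = '\t' then pvCountIndent rest + 1
    else if hc : c = ' ' then
      max 1 (((c :: rest).takeWhile (· = ' ')).length / 3) + pvCountIndent ((c :: rest).dropWhile (· = ' '))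
    else 0
termination_by cs => cs.length
decreasing_by
  · simp only [List.length_cons]
    exact Nat.lt_succ_self _
  · have h : List.dropWhile (fun x => decide (x = ' ')) (c :: rest) = List.dropWhile (fun x => decide (x = ' ')) rest := by
      simp [hc]
    rw [h]
    simp only [List.length_cons]
    exact Nat.lt_succ_of_le (List.length_dropWhile_le _ _)

def pvIndentLvl (line : String) : Nat := pvCountIndent line.toList

-- text after the first '[ ]' (stripped.split('[ ]', 1)[1].strip())
def pvAfterPending (s : String) : String :=
  PySem.Str.strip ((((PySem.Str.splitMax? s "[ ]" 1).getD [])).getD 1 "")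

-- inner loop of A: scan lines after the pending main task for a pending subtask
def pvInnerA : List String → Option String
  | [] => none
  | m :: rest =>
    let stripped := PySem.Str.strip (pvRemoveComment m)
    let ind := pvIndentLvl m
    if ind = 1 ∧ PySem.Str.startswith stripped "- [" then none
    else if ind > 1 ∧ PySem.Str.startswith stripped "- [" ∧ PySem.Str.isIn "[ ]" stripped then
      some (pvAfterPending stripped)
    else pvInnerA rest

-- outer loop of A
def pvOuterA (n : Int) : List String → Nat → Option Int × Option String × Option String × Int
  | [], _ => (none, none, none, n)
  | m :: rest, i =>
    let stripped := PySem.Str.strip (pvRemoveComment m)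
    if stripped = "" ∨ ¬ PySem.Str.startswith stripped "- [" then pvOuterA n rest (i + 1)
    else if pvIndentLvl m = 1 then
      if PySem.Str.isIn "[ ]" stripped then
        let text := pvAfterPending stripped
        match pvInnerA rest with
        | some sub => (some ((i : Int) + 1), some text, some sub, n)
        | none => (some ((i : Int) + 1), some text, none, n)
      else pvOuterA n rest (i + 1)
    else pvOuterA n rest (i + 1)

def get_current_milestone (campaign_data : List (String × List String)) : Option Int × Option String × Option String × Int :=
  let milestones := PySem.Dict.getD (PySem.Dict.mk campaign_data) "milestones" []
  pvOuterA (milestones.length : Int) milestones 0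

-- ===== PORT B =====
-- single pass; `found` carries the first pending main task once seen
def pvScanB (n : Int) : List String → Nat → Option (Int × String) → Option Int × Option String × Option String × Int
  | [], _, found =>
    match found with
    | some (k, t) => (some k, some t, none, n)
    | none => (none, none, none, n)
  | m :: rest, i, found =>
    let stripped := PySem.Str.strip (pvRemoveComment m)
    if ¬ PySem.Str.startswith stripped "- [" then pvScanB n rest (i + 1) found
    else
      let lvl := pvIndentLvl m
      match found with
      | none =>
        if lvl = 1 ∧ PySem.Str.isIn "[ ]" stripped then
          pvScanB n rest (i + 1) (some ((i : Int) + 1, pvAfterPending stripped))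
        else pvScanB n rest (i + 1) none
      | some (k, t) =>
        if lvl = 1 then (some k, some t, none, n)
        else if lvl > 1 ∧ PySem.Str.isIn "[ ]" stripped then
          (some k, some t, some (pvAfterPending stripped), n)
        else pvScanB n rest (i + 1) (some (k, t))

def get_current_milestone_alt (campaign_data : List (String × List String)) : Option Int × Option String × Option String × Int :=
  let milestones := PySem.Dict.getD (PySem.Dict.mk campaign_data) "milestones" []
  pvScanB (milestones.length : Int) milestones 0 none

-- ===== PRECONDITION & SPEC =====
def Spec_get_current_milestone (campaign_data : List (String × List String)) (out : Option Int × Option String × Option String × Int) : Prop := out = get_current_milestone_alt campaign_data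
instance (campaign_data : List (String × List String)) (out : Option Int × Option String × Option String × Int) : Decidable (Spec_get_current_milestone campaign_data out) := by unfold Spec_get_current_milestone; infer_instance

-- ===== CLAIM (what is proved, stated in full; the proofs are below) =====
def Claim_equal_get_current_milestone : Prop := ∀ (campaign_data : List (String × List String)), Dom_get_current_milestone campaign_data → Spec_get_current_milestone campaign_data (get_current_milestone campaign_data)

-- ===== LEMMAS AND PROOFS =====
lemma startswith_ne_empty {s : String} (h : PySem.Str.startswith s "- [" = true) : s ≠ "" := by
  intro he; subst he; exact absurd h (by decide)

-- once the main task is found, B's continued scan computes A's inner loop result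
lemma scanB_found (n : Int) (k : Int) (t : String) :
    ∀ (ms : List String) (i : Nat),
      pvScanB n ms i (some (k, t)) =
        match pvInnerA ms with
        | some sub => (some k, some t, some sub, n)
        | none => (some k, some t, none, n) := by
  intro ms
  induction ms with
  | nil => intro i; rfl
  | cons m rest ih =>
    intro i
    simp only [pvScanB, pvInnerA]
    by_cases hs : PySem.Str.startswith (PySem.Str.strip (pvRemoveComment m)) "- [" = true
    · by_cases h1 : pvIndentLvl m = 1
      · rw [if_neg (not_not_intro hs), if_pos h1, if_pos ⟨h1, hs⟩]
      · by_cases h2 : pvIndentLvl m > 1 ∧ PySem.Str.isIn "[ ]" (PySem.Str.strip (pvRemoveComment m)) = true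
        · rw [if_neg (not_not_intro hs), if_neg h1, if_pos h2,
              if_neg (fun hc => h1 hc.1), if_pos ⟨h2.1, hs, h2.2⟩]
        · rw [if_neg (not_not_intro hs), if_neg h1, if_neg h2,
              if_neg (fun hc => h1 hc.1), if_neg (fun hc => h2 ⟨hc.1, hc.2.2⟩)]
          exact ih (i + 1)
    · rw [if_pos hs, if_neg (fun hc => hs hc.2), if_neg (fun hc => hs hc.2.1)]
      exact ih (i + 1)

lemma scanB_none (n : Int) :
    ∀ (ms : List String) (i : Nat), pvScanB n ms i none = pvOuterA n ms i := by
  intro ms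
  induction ms with
  | nil => intro i; rfl
  | cons m rest ih =>
    intro i
    simp only [pvScanB, pvOuterA]
    by_cases hs : PySem.Str.startswith (PySem.Str.strip (pvRemoveComment m)) "- [" = true
    · have hne : ¬ (PySem.Str.strip (pvRemoveComment m) = "" ∨ ¬ PySem.Str.startswith (PySem.Str.strip (pvRemoveComment m)) "- [" = true) := by
        rintro (he | hx)
        · exact startswith_ne_empty hs he
        · exact hx hs
      by_cases h1 : pvIndentLvl m = 1
      · by_cases hp : PySem.Str.isIn "[ ]" (PySem.Str.strip (pvRemoveComment m)) = true
        · rw [if_neg (not_not_intro hs), if_neg hne, if_pos ⟨h1, hp⟩, if_pos h1, if_pos hp]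
          exact scanB_found n _ _ rest (i + 1)
        · rw [if_neg (not_not_intro hs), if_neg hne, if_neg (fun hc => hp hc.2),
              if_pos h1, if_neg hp]
          exact ih (i + 1)
      · rw [if_neg (not_not_intro hs), if_neg hne, if_neg (fun hc => h1 hc.1), if_neg h1]
        exact ih (i + 1)
    · rw [if_pos hs, if_pos (Or.inr hs)]
      exact ih (i + 1)

-- ===== VERDICT (by name: the statement is the Claim_ definition above) =====
theorem get_current_milestone_spec : Claim_equal_get_current_milestone := by
  intro campaign_data _
  unfold Spec_get_current_milestone get_current_milestone get_current_milestone_alt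
  rw [scanB_none]
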